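-- pv_equiv track=rewrite | github.com/Mirascope/mirascope | scripts/serve_docs_dev.py | comment_out_plugin
-- ===== SOURCE A (Python) =====
-- def comment_out_plugin(lines: list[str], plugin_name: str) -> list[str]:
--     """Comment out a plugin and its configuration block in the mkdocs.yml file."""
--     # We process the mkdocs.yml file line-by-line rather than trying to parse the YAML
--     # because mkdocs.yml is difficult to parse correctly.
--     in_plugin_block = False
--     modified_lines = lines.copy()
--
--     for i, line in enumerate(modified_lines):
--         stripped_line = line.strip()
--         if stripped_line.startswith("-") and plugin_name in stripped_line:
--             in_plugin_block = True
--             modified_lines[i] = f"# {line}"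
--         elif in_plugin_block:
--             if stripped_line.startswith("-") or not stripped_line:
--                 in_plugin_block = False
--             else:
--                 modified_lines[i] = f"# {line}"
--
--     return modified_lines
-- ===== SOURCE B (Python) =====
-- def comment_out_plugin(lines: list[str], plugin_name: str) -> list[str]:
--     """Comment out a plugin and its configuration block in the mkdocs.yml file."""
--     # Phase 1: collect indices to comment. A '-' line containing the plugin name
--     # starts a block; its continuation lines run until a blank or '-' line,
--     # which is not consumed (it may itself start a new block).
--     idxs = []
--     i, n = 0, len(lines)
--     while i < n:
--         s = lines[i].strip()
--         if s.startswith("-") and plugin_name in s: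
--             idxs.append(i)
--             j = i + 1
--             while j < n:
--                 t = lines[j].strip()
--                 if not t or t.startswith("-"):
--                     break
--                 idxs.append(j)
--                 j += 1
--             i = j
--         else:
--             i += 1
--     # Phase 2: apply.
--     marked = set(idxs)
--     return [f"# {line}" if k in marked else line for k, line in enumerate(lines)]
-- ===== Notes on version B (the rewrite author's own statement) =====
-- stated objective: alternative
-- what changed: A's single flag-driven in-place pass is replaced by two phases: an index-jumping scan (outer while plus an inner forward walk over each plugin block) that collects the indices to comment, followed by a comprehension that prefixes '# ' exactly at the collected indices.
import Mathlib
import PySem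

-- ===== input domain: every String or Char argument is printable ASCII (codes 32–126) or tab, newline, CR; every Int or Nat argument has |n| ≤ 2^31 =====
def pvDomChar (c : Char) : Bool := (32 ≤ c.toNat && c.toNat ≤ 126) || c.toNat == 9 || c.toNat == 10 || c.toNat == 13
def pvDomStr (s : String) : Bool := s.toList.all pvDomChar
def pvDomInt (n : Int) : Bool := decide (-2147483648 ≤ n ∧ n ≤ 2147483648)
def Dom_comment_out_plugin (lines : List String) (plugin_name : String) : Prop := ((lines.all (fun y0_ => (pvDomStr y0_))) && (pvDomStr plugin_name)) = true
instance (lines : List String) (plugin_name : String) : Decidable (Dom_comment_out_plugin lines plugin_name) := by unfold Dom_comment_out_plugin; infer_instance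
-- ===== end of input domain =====

-- B replaces A's single flag-driven pass by two phases — collect the indices to
-- comment, then rebuild the list by index membership — as an alternative decomposition.

-- shared helper: f"# {line}"
def pvHash (line : String) : String := String.ofList ('#' :: ' ' :: line.toList)

-- ===== PORT A =====
-- the for-loop over enumerate(modified_lines), carrying the in_plugin_block flag
def aGo (pn : String) : Bool → List String → List String
  | _, [] => []
  | flag, line :: rest =>
    if PySem.Str.startswith (PySem.Str.strip line) "-" && PySem.Str.isIn pn (PySem.Str.strip line) then
      pvHash line :: aGo pn true rest
    else if flag then
      if PySem.Str.startswith (PySem.Str.strip line) "-" || PySem.Str.strip line == "" then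
        line :: aGo pn false rest
      else
        pvHash line :: aGo pn true rest
    else
      line :: aGo pn false rest

def comment_out_plugin (lines : List String) (plugin_name : String) : List String :=
  aGo plugin_name false lines

-- ===== PORT B =====
-- phase 1 of Source B: the outer while-loop (bScan) and the inner forward walk (bWalk)
mutual
def bScan (pn : String) (l : List String) (i : Int) : List Int :=
  match l with
  | [] => []
  | line :: rest =>
    if PySem.Str.startswith (PySem.Str.strip line) "-" && PySem.Str.isIn pn (PySem.Str.strip line) then
      i :: bWalk pn rest (i + 1)
    else
      bScan pn rest (i + 1)
termination_by (l.length, 0)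
decreasing_by all_goals (simp only [List.length_cons]; first | (apply Prod.Lex.left; omega) | (apply Prod.Lex.right; omega))

def bWalk (pn : String) (l : List String) (j : Int) : List Int :=
  match l with
  | [] => []
  | line :: rest =>
    if PySem.Str.strip line == "" || PySem.Str.startswith (PySem.Str.strip line) "-" then
      bScan pn (line :: rest) j
    else
      j :: bWalk pn rest (j + 1)
termination_by (l.length, 1)
decreasing_by all_goals (simp only [List.length_cons]; first | (apply Prod.Lex.left; omega) | (apply Prod.Lex.right; omega))
end

def comment_out_plugin_alt (lines : List String) (plugin_name : String) : List String :=
  let marked := PySem.Set.ofList (bScan plugin_name lines 0)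
  (PySem.List.enumerate lines 0).map (fun ki => if ki.1 ∈ marked then pvHash ki.2 else ki.2)

-- ===== PRECONDITION & SPEC =====
def Spec_comment_out_plugin (lines : List String) (plugin_name : String) (out : List String) : Prop := out = comment_out_plugin_alt lines plugin_name
instance (lines : List String) (plugin_name : String) (out : List String) : Decidable (Spec_comment_out_plugin lines plugin_name out) := by unfold Spec_comment_out_plugin; infer_instance

-- ===== CLAIM (what is proved, stated in full; the proofs are below) =====
def Claim_equal_comment_out_plugin : Prop := ∀ (lines : List String) (plugin_name : String), Dom_comment_out_plugin lines plugin_name → Spec_comment_out_plugin lines plugin_name (comment_out_plugin lines plugin_name)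

-- ===== LEMMAS AND PROOFS =====

-- proof-side view of phase 2: apply an index set S to the lines starting at index i
def applyFrom (S : List Int) (i : Int) : List String → List String
  | [] => []
  | x :: r => (if i ∈ S then pvHash x else x) :: applyFrom S (i + 1) r

theorem applyFrom_cons_lt (a : Int) (S : List Int) :
    ∀ (l : List String) (j : Int), a < j → applyFrom (a :: S) j l = applyFrom S j l := by
  intro l
  induction l with
  | nil => intro j _; rfl
  | cons x r ih =>
    intro j hj
    have hne : j ≠ a := by omega
    simp only [applyFrom, List.mem_cons, hne, false_or, ih (j + 1) (by omega)]

-- every index collected by phase 1 is at least the starting index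
theorem scan_walk_ge (pn : String) :
    ∀ (l : List String) (i k : Int),
      (k ∈ bScan pn l i → i ≤ k) ∧ (k ∈ bWalk pn l i → i ≤ k) := by
  intro l
  induction l with
  | nil => intro i k; simp [bScan, bWalk]
  | cons line rest ih =>
    intro i k
    constructor
    · intro hk
      rw [bScan] at hk
      by_cases h : (PySem.Str.startswith (PySem.Str.strip line) "-" && PySem.Str.isIn pn (PySem.Str.strip line)) = true
      · rw [if_pos h] at hk
        rcases List.mem_cons.mp hk with h1 | h2
        · omega
        · have := (ih (i + 1) k).2 h2; omega
      · rw [if_neg h] at hk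
        have := (ih (i + 1) k).1 hk; omega
    · intro hk
      rw [bWalk] at hk
      by_cases h : (PySem.Str.strip line == "" || PySem.Str.startswith (PySem.Str.strip line) "-") = true
      · rw [if_pos h, bScan] at hk
        by_cases h2 : (PySem.Str.startswith (PySem.Str.strip line) "-" && PySem.Str.isIn pn (PySem.Str.strip line)) = true
        · rw [if_pos h2] at hk
          rcases List.mem_cons.mp hk with h1 | h3
          · omega
          · have := (ih (i + 1) k).2 h3; omega
        · rw [if_neg h2] at hk
          have := (ih (i + 1) k).1 hk; omega
      · rw [if_neg h] at hk
        rcases List.mem_cons.mp hk with h1 | h3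
        · omega
        · have := (ih (i + 1) k).2 h3; omega

-- the heart of the equivalence: A's flag pass equals "apply the collected indices",
-- flag false ↔ the outer scan, flag true ↔ the inner walk
theorem aGo_eq_applyFrom (pn : String) :
    ∀ (l : List String) (i : Int),
      aGo pn false l = applyFrom (bScan pn l i) i l ∧
      aGo pn true l = applyFrom (bWalk pn l i) i l := by
  intro l
  induction l with
  | nil => intro i; constructor <;> simp [aGo, applyFrom]
  | cons line rest ih =>
    intro i
    cases hs : PySem.Str.startswith (PySem.Str.strip line) "-" with
    | true =>
      cases hi : PySem.Str.isIn pn (PySem.Str.strip line) with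
      | true =>
        -- the head is a trigger line: both flags comment it and a block (re)starts
        have htrig : (PySem.Str.startswith (PySem.Str.strip line) "-" && PySem.Str.isIn pn (PySem.Str.strip line)) = true := by
          rw [hs, hi]; rfl
        have htb : (PySem.Str.strip line == "" || PySem.Str.startswith (PySem.Str.strip line) "-") = true := by
          rw [hs]; simp
        have hmain : pvHash line :: aGo pn true rest
            = applyFrom (i :: bWalk pn rest (i + 1)) i (line :: rest) := by
          simp only [applyFrom]
          rw [if_pos (List.mem_cons_self ..), applyFrom_cons_lt i _ rest (i + 1) (by omega),
            (ih (i + 1)).2]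
        constructor
        · simp only [aGo]; rw [if_pos htrig, bScan, if_pos htrig]; exact hmain
        · simp only [aGo]; rw [if_pos htrig, bWalk, if_pos htb, bScan, if_pos htrig]; exact hmain
      | false =>
        -- '-' line without the plugin name: a terminator, left unchanged
        have htrig : ¬ (PySem.Str.startswith (PySem.Str.strip line) "-" && PySem.Str.isIn pn (PySem.Str.strip line)) = true := by
          rw [hs, hi]; simp
        have hta : (PySem.Str.startswith (PySem.Str.strip line) "-" || PySem.Str.strip line == "") = true := by
          rw [hs]; simp
        have htb : (PySem.Str.strip line == "" || PySem.Str.startswith (PySem.Str.strip line) "-") = true := by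
          rw [hs]; simp
        have hnm : i ∉ bScan pn rest (i + 1) := fun hmem => by
          have := (scan_walk_ge pn rest (i + 1) i).1 hmem; omega
        have hmain : line :: aGo pn false rest
            = applyFrom (bScan pn rest (i + 1)) i (line :: rest) := by
          simp only [applyFrom]
          rw [if_neg hnm, (ih (i + 1)).1]
        constructor
        · simp only [aGo]; rw [if_neg htrig, if_neg (by simp), bScan, if_neg htrig]; exact hmain
        · simp only [aGo]
          rw [if_neg htrig, if_pos (by trivial), if_pos hta, bWalk, if_pos htb, bScan, if_neg htrig]
          exact hmain
    | false =>
      have htrig : ¬ (PySem.Str.startswith (PySem.Str.strip line) "-" && PySem.Str.isIn pn (PySem.Str.strip line)) = true := by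
        rw [hs]; simp
      cases he : (PySem.Str.strip line == "") with
      | true =>
        -- blank line: a terminator, left unchanged
        have hta : (PySem.Str.startswith (PySem.Str.strip line) "-" || PySem.Str.strip line == "") = true := by
          rw [hs, he]; simp
        have htb : (PySem.Str.strip line == "" || PySem.Str.startswith (PySem.Str.strip line) "-") = true := by
          rw [he]; simp
        have hnm : i ∉ bScan pn rest (i + 1) := fun hmem => by
          have := (scan_walk_ge pn rest (i + 1) i).1 hmem; omega
        have hmain : line :: aGo pn false rest
            = applyFrom (bScan pn rest (i + 1)) i (line :: rest) := by
          simp only [applyFrom]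
          rw [if_neg hnm, (ih (i + 1)).1]
        constructor
        · simp only [aGo]; rw [if_neg htrig, if_neg (by simp), bScan, if_neg htrig]; exact hmain
        · simp only [aGo]
          rw [if_neg htrig, if_pos (by trivial), if_pos hta, bWalk, if_pos htb, bScan, if_neg htrig]
          exact hmain
      | false =>
        -- ordinary line: commented exactly when inside a block
        have hta : ¬ (PySem.Str.startswith (PySem.Str.strip line) "-" || PySem.Str.strip line == "") = true := by
          rw [hs, he]; simp
        have htb : ¬ (PySem.Str.strip line == "" || PySem.Str.startswith (PySem.Str.strip line) "-") = true := by
          rw [hs, he]; simp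
        constructor
        · have hnm : i ∉ bScan pn rest (i + 1) := fun hmem => by
            have := (scan_walk_ge pn rest (i + 1) i).1 hmem; omega
          simp only [aGo]
          rw [if_neg htrig, if_neg (by simp), bScan, if_neg htrig]
          simp only [applyFrom]
          rw [if_neg hnm, (ih (i + 1)).1]
        · have hnm : i ∉ bWalk pn rest (i + 1) := fun hmem => by
            have := (scan_walk_ge pn rest (i + 1) i).2 hmem; omega
          simp only [aGo]
          rw [if_neg htrig, if_pos (by trivial), if_neg hta, bWalk, if_neg htb]
          simp only [applyFrom]
          rw [if_pos (List.mem_cons_self ..), applyFrom_cons_lt i _ rest (i + 1) (by omega),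
            (ih (i + 1)).2]

-- phase 2 of B ("prefix where the index is marked") is applyFrom
theorem alt_eq_applyFrom (lines : List String) (pn : String) :
    comment_out_plugin_alt lines pn = applyFrom (bScan pn lines 0) 0 lines := by
  unfold comment_out_plugin_alt
  generalize bScan pn lines 0 = S
  suffices h : ∀ (l : List String) (i : Int),
      (PySem.List.enumerate l i).map
        (fun ki => if ki.1 ∈ PySem.Set.ofList S then pvHash ki.2 else ki.2) = applyFrom S i l by
    exact h lines 0
  intro l
  induction l with
  | nil => intro i; simp [PySem.List.enumerate, applyFrom]
  | cons x r ih =>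
    intro i
    rw [PySem.List.enumerate_cons]
    simp only [List.map_cons, applyFrom, ih (i + 1)]
    congr 1
    by_cases hm : i ∈ S
    · rw [if_pos ((PySem.Set.mem_ofList S i).mpr hm), if_pos hm]
    · rw [if_neg (fun h => hm ((PySem.Set.mem_ofList S i).mp h)), if_neg hm]

-- ===== VERDICT (by name: the statement is the Claim_ definition above) =====
theorem comment_out_plugin_spec : Claim_equal_comment_out_plugin := by
  intro lines pn _
  unfold Spec_comment_out_plugin comment_out_plugin
  rw [alt_eq_applyFrom]
  exact (aGo_eq_applyFrom pn lines 0).1
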